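-- pv_equiv track=rewrite | github.com/DevOcho/auto | auto/autocli/config.py | _get_registry_bounds
-- ===== SOURCE A (Python) =====
-- def _get_registry_bounds(lines):
--     """Find the start and end indices of the registry block in the YAML file."""
--     registry_idx = -1
--     for i, line in enumerate(lines):
--         if line.startswith("registry:"):
--             registry_idx = i
--             break
--
--     if registry_idx == -1:
--         return -1, -1
--
--     last_valid_idx = registry_idx + 1
--     insert_idx = registry_idx + 1
--
--     while insert_idx < len(lines):
--         line = lines[insert_idx]
--         if (
--             line.strip() != ""
--             and not line.startswith(" ")
--             and not line.startswith("-")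
--             and not line.startswith("#")
--         ):
--             break
--         if line.strip().startswith("- image:"):
--             last_valid_idx = insert_idx + 1
--         insert_idx += 1
--
--     # Move past immediate trailing comments gracefully
--     if last_valid_idx == registry_idx + 1:
--         while last_valid_idx < len(lines) and lines[last_valid_idx].strip().startswith(
--             "#"
--         ):
--             last_valid_idx += 1
--
--     return registry_idx, last_valid_idx
-- ===== SOURCE B (Python) =====
-- def _breaks(line):
--     return line.strip() != "" and not line.startswith((" ", "-", "#"))
--
--
-- def _get_registry_bounds(lines):
--     """Find the start and end indices of the registry block in the YAML file."""
--     reg = next((i for i, l in enumerate(lines) if l.startswith("registry:")), -1)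
--     if reg == -1:
--         return -1, -1
--     rest = lines[reg + 1:]
--     blk = next((j for j, l in enumerate(rest) if _breaks(l)), len(rest))
--     img = next((j for j in range(blk - 1, -1, -1)
--                 if rest[j].strip().startswith("- image:")), -1)
--     if img != -1:
--         return reg, reg + 2 + img
--     skip = next((j for j in range(len(rest))
--                  if not rest[j].strip().startswith("#")), len(rest))
--     return reg, reg + 1 + skip
-- ===== Notes on version B (the rewrite author's own statement) =====
-- stated objective: alternative
-- what changed: Replaces A's single stateful while-loop (mutable last_valid/insert_idx with break) by three independent generator searches: first 'registry:' line, first block-terminating line, and a reversed scan for the last '- image:' line, plus a count of leading comment lines as fallback.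
import Mathlib
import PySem

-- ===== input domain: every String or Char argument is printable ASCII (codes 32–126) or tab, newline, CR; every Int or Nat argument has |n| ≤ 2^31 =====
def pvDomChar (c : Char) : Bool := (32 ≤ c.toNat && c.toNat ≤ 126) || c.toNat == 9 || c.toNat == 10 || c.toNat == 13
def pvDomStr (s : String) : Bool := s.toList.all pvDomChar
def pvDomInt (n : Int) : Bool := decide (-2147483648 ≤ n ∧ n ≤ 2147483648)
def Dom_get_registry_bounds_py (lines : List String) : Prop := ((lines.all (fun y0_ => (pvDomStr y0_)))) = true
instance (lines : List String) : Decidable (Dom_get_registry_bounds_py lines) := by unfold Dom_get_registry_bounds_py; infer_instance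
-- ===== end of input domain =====

-- B replaces A's single stateful while-loop by three independent searches
-- (block end, last "- image:" line found by a reversed scan, leading-comment count):
-- an alternative decomposition of the same O(n) task, not claimed faster.


-- ===== PORT A =====
-- the break condition of A's while loop (raw-vs-stripped mix exactly as in A)
def pvBrkA (l : String) : Bool :=
  (!(PySem.Str.strip l == "")) && (!(PySem.Str.startswith l " "))
    && (!(PySem.Str.startswith l "-")) && (!(PySem.Str.startswith l "#"))

def pvImgA (l : String) : Bool := PySem.Str.startswith (PySem.Str.strip l) "- image:"

def pvHashA (l : String) : Bool := PySem.Str.startswith (PySem.Str.strip l) "#"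

-- A's first for/break loop: index of the first "registry:" line, -1 if absent
def pvFindRegA : List String → Nat → Int
  | [], _ => -1
  | l :: ls, i => if PySem.Str.startswith l "registry:" then (i : Int) else pvFindRegA ls (i + 1)

-- A's while loop over lines[insert_idx:]: state (insert_idx, last_valid_idx)
def pvLoopA : List String → Nat → Nat → Nat
  | [], _, lv => lv
  | l :: rs, idx, lv =>
    if pvBrkA l then lv
    else pvLoopA rs (idx + 1) (if pvImgA l then idx + 1 else lv)

-- A's trailing-comment skip loop
def pvSkipA : List String → Nat → Nat
  | [], lv => lv
  | l :: rs, lv => if pvHashA l then pvSkipA rs (lv + 1) else lv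

def get_registry_bounds_py (lines : List String) : Int × Int :=
  let registry_idx := pvFindRegA lines 0
  if registry_idx = -1 then (-1, -1)
  else
    -- registry_idx is an enumerate index here, hence ≥ 0: toNat is exact
    let r := registry_idx.toNat
    let lv := pvLoopA (lines.drop (r + 1)) (r + 1) (r + 1)
    let lv' := if lv = r + 1 then pvSkipA (lines.drop (r + 1)) (r + 1) else lv
    ((r : Int), (lv' : Int))

-- ===== PORT B =====
def pvBrkB (l : String) : Bool :=
  (!(PySem.Str.strip l == ""))
    && (!(PySem.Str.startswith l " " || PySem.Str.startswith l "-" || PySem.Str.startswith l "#"))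

def pvImgB (l : String) : Bool := PySem.Str.startswith (PySem.Str.strip l) "- image:"

def pvHashB (l : String) : Bool := PySem.Str.startswith (PySem.Str.strip l) "#"

def get_registry_bounds_py_alt (lines : List String) : Int × Int :=
  match lines.findIdx? (fun l => PySem.Str.startswith l "registry:") with
  | none => (-1, -1)
  | some reg =>
    let rest := lines.drop (reg + 1)
    let blk := (rest.findIdx? pvBrkB).getD rest.length
    -- reversed scan for the last image line ↦ findIdx? on the reversed prefix
    match (rest.take blk).reverse.findIdx? pvImgB with
    | some k => ((reg : Int), (reg : Int) + 2 + (((rest.take blk).length - 1 - k : Nat) : Int))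
    | none =>
      let skip := (rest.findIdx? (fun l => !(pvHashB l))).getD rest.length
      ((reg : Int), (reg : Int) + 1 + (skip : Int))

-- ===== PRECONDITION & SPEC =====
def Spec_get_registry_bounds_py (lines : List String) (out : Int × Int) : Prop := out = get_registry_bounds_py_alt lines
instance (lines : List String) (out : Int × Int) : Decidable (Spec_get_registry_bounds_py lines out) := by unfold Spec_get_registry_bounds_py; infer_instance

-- ===== CLAIM (what is proved, stated in full; the proofs are below) =====
def Claim_equal_get_registry_bounds_py : Prop := ∀ (lines : List String), Dom_get_registry_bounds_py lines → Spec_get_registry_bounds_py lines (get_registry_bounds_py lines)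

-- ===== LEMMAS AND PROOFS =====

-- last index in xs satisfying p (proof-side characterisation of both programs' image search)
def pvLast? {α : Type} (p : α → Bool) : List α → Option Nat
  | [] => none
  | x :: xs =>
    match pvLast? p xs with
    | some j => some (j + 1)
    | none => if p x then some 0 else none

theorem pvBrkA_eq : pvBrkA = pvBrkB := by
  funext l
  simp only [pvBrkA, pvBrkB]
  cases PySem.Str.strip l == "" <;>
    cases PySem.Str.startswith l " " <;>
      cases PySem.Str.startswith l "-" <;> cases PySem.Str.startswith l "#" <;> rfl

theorem pvFindRegA_eq (ls : List String) :
    ∀ i : Nat, pvFindRegA ls i =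
      match ls.findIdx? (fun l => PySem.Str.startswith l "registry:") with
      | some j => ((i + j : Nat) : Int)
      | none => -1 := by
  induction ls with
  | nil => intro i; simp [pvFindRegA]
  | cons l ls ih =>
    intro i
    simp only [pvFindRegA, List.findIdx?_cons]
    by_cases h : PySem.Str.startswith l "registry:" = true
    · simp only [h, if_true]
      simp
    · simp only [h, if_false, Bool.false_eq_true, ih (i + 1)]
      cases hf : ls.findIdx? (fun l => PySem.Str.startswith l "registry:") with
      | none => simp
      | some v =>
        simp only [Option.map_some]
        push_cast
        ring

theorem pvSkipA_eq (rs : List String) :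
    ∀ lv : Nat, pvSkipA rs lv = lv + (rs.findIdx? (fun l => !(pvHashA l))).getD rs.length := by
  induction rs with
  | nil => intro lv; simp [pvSkipA]
  | cons l rs ih =>
    intro lv
    simp only [pvSkipA, List.findIdx?_cons]
    by_cases h : pvHashA l = true
    · simp only [h, if_true, ih (lv + 1), Bool.not_true]
      cases hf : rs.findIdx? (fun l => !(pvHashA l)) <;> simp <;> omega
    · simp [h]

theorem pvLoopA_eq (rs : List String) :
    ∀ idx lv : Nat, pvLoopA rs idx lv =
      match pvLast? pvImgA (rs.take ((rs.findIdx? pvBrkA).getD rs.length)) with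
      | some j => idx + j + 1
      | none => lv := by
  induction rs with
  | nil => intro idx lv; simp [pvLoopA, pvLast?]
  | cons l rs ih =>
    intro idx lv
    simp only [pvLoopA, List.findIdx?_cons]
    by_cases h : pvBrkA l = true
    · simp [h, List.take_zero, pvLast?]
    · simp only [h, if_false, Bool.false_eq_true, ih (idx + 1)]
      cases hf : rs.findIdx? pvBrkA with
      | some j =>
        simp only [Option.map_some, Option.getD_some, List.take_succ_cons, pvLast?]
        cases hl : pvLast? pvImgA (rs.take j) with
        | some j' => ring
        | none => by_cases hi : pvImgA l = true <;> simp [hi]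
      | none =>
        simp only [Option.map_none, Option.getD_none, List.length_cons, List.take_succ_cons,
          pvLast?]
        cases hl : pvLast? pvImgA (rs.take rs.length) with
        | some j' => ring
        | none => by_cases hi : pvImgA l = true <;> simp [hi]

theorem pvLast?_eq_reverse_findIdx {α : Type} (p : α → Bool) (xs : List α) :
    pvLast? p xs = (xs.reverse.findIdx? p).map (fun k => xs.length - 1 - k) := by
  induction xs with
  | nil => simp [pvLast?]
  | cons x xs ih =>
    simp only [pvLast?, List.reverse_cons, List.findIdx?_append, ih]
    cases hf : xs.reverse.findIdx? p with
    | some k =>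
      have hk : k < xs.reverse.length := (List.findIdx?_eq_some_iff_findIdx_eq.mp hf).1
      simp only [List.length_reverse] at hk
      simp only [Option.map_some, Option.some_or, List.length_cons, Option.map_some,
        Option.some.injEq]
      omega
    | none =>
      simp only [Option.map_none, Option.none_or, List.findIdx?_cons, List.findIdx?_nil]
      by_cases hx : p x = true
      · simp only [hx, if_true]
        simp
      · simp [hx]

-- ===== VERDICT (by name: the statement is the Claim_ definition above) =====
theorem get_registry_bounds_py_spec : Claim_equal_get_registry_bounds_py := by
  intro lines _dom
  unfold Spec_get_registry_bounds_py get_registry_bounds_py get_registry_bounds_py_alt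
  simp only [pvFindRegA_eq lines 0]
  cases hf : lines.findIdx? (fun l => PySem.Str.startswith l "registry:") with
  | none => simp
  | some j =>
    have hj : ((0 + j : Nat) : Int) ≠ -1 := by omega
    rw [if_neg hj]
    simp only [Nat.zero_add, Int.toNat_natCast,
      pvLoopA_eq, pvSkipA_eq, ← pvBrkA_eq,
      pvLast?_eq_reverse_findIdx pvImgA]
    have himg : pvImgA = pvImgB := rfl
    have hhash : pvHashA = pvHashB := rfl
    rw [← himg, ← hhash]
    set rest := lines.drop (j + 1) with hrest
    set blk := (rest.findIdx? pvBrkA).getD rest.length with hblk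
    cases hl : (rest.take blk).reverse.findIdx? pvImgA with
    | none => simp
    | some k =>
      have hk : k < (rest.take blk).reverse.length :=
        (List.findIdx?_eq_some_iff_findIdx_eq.mp hl).1
      simp only [List.length_reverse] at hk
      simp only [Option.map_some]
      have hne : ¬ (j + 1 + ((rest.take blk).length - 1 - k) + 1 = j + 1) := by omega
      rw [if_neg hne]
      simp only [Prod.mk.injEq, true_and]
      push_cast
      omega
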